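-- pv_equiv track=rewrite | github.com/JordanGunn/rsge_codebase | lidar/LiQCS/archive/lidar_summary.py | countleaps
-- ===== SOURCE A (Python) =====
-- def countleaps(gpsTime):
--     """Count number of leap seconds that have passed."""
--
--     # a tuple of the gps times where leap seconds were added
--     leaps = (
--         46828800, 78364801, 109900802, 173059203, 252028804,
--         315187205, 346723206, 393984007, 425520008, 457056009,
--         504489610, 551750411, 599184012, 820108813, 914803214,
--         1025136015
--     )
--
--     nleaps = 0
--     for leap in leaps:
--         if gpsTime >= leap:
--             nleaps += 1
--
--     return nleaps
-- ===== SOURCE B (Python) =====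
-- import bisect
--
--
-- def countleaps(gpsTime):
--     """Count number of leap seconds that have passed."""
--
--     # a tuple of the gps times where leap seconds were added
--     leaps = (
--         46828800, 78364801, 109900802, 173059203, 252028804,
--         315187205, 346723206, 393984007, 425520008, 457056009,
--         504489610, 551750411, 599184012, 820108813, 914803214,
--         1025136015
--     )
--
--     # leaps is sorted ascending, so the number of entries <= gpsTime
--     # is exactly the insertion point found by binary search
--     return bisect.bisect_right(leaps, gpsTime)
-- ===== Notes on version B (the rewrite author's own statement) =====
-- stated objective: idiomatic
-- what changed: Replaced the explicit accumulator loop over the sorted leap-second table with bisect.bisect_right, a binary search that returns the count of entries <= gpsTime directly.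
import Mathlib
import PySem

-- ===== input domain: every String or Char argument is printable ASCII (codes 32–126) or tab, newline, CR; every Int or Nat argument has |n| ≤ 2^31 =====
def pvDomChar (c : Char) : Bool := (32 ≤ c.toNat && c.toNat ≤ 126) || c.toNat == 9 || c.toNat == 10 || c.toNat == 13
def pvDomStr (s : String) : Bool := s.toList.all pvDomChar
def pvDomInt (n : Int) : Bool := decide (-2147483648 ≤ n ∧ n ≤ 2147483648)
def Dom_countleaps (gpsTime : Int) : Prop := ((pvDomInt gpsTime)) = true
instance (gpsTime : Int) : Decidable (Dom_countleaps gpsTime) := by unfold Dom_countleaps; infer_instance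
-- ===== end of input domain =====

-- B replaces A's linear accumulator loop over the sorted leap table with bisect.bisect_right (binary search); idiomatic, same result.


-- the shared table of GPS times at which leap seconds were added
def leapsTable : List Int :=
  [46828800, 78364801, 109900802, 173059203, 252028804,
   315187205, 346723206, 393984007, 425520008, 457056009,
   504489610, 551750411, 599184012, 820108813, 914803214,
   1025136015]

-- ===== PORT A =====
-- literal transliteration of A: nleaps = 0; for leap in leaps: if gpsTime >= leap: nleaps += 1
def countleaps (gpsTime : Int) : Int :=
  List.foldl (fun nleaps leap => if gpsTime ≥ leap then nleaps + 1 else nleaps) 0 leapsTable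

-- ===== PORT B =====
-- literal transliteration of B: return bisect.bisect_right(leaps, gpsTime)
def countleaps_alt (gpsTime : Int) : Int :=
  ((PySem.List.bisectRight leapsTable gpsTime : Nat) : Int)

-- ===== PRECONDITION & SPEC =====
def Spec_countleaps (gpsTime : Int) (out : Int) : Prop := out = countleaps_alt gpsTime
instance (gpsTime : Int) (out : Int) : Decidable (Spec_countleaps gpsTime out) := by unfold Spec_countleaps; infer_instance

-- ===== CLAIM (what is proved, stated in full; the proofs are below) =====
def Claim_equal_countleaps : Prop := ∀ (gpsTime : Int), Dom_countleaps gpsTime → Spec_countleaps gpsTime (countleaps gpsTime)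

-- ===== LEMMAS AND PROOFS =====

-- if p holds on exactly the first k positions of xs, then countP p xs = k
theorem countP_of_iff_lt {α : Type} (p : α → Bool) :
    ∀ (xs : List α) (k : Nat), k ≤ xs.length →
      (∀ j (hj : j < xs.length), (p xs[j] = true ↔ j < k)) → xs.countP p = k := by
  intro xs
  induction xs with
  | nil => intro k hk _; simp only [List.countP_nil, List.length_nil] at hk ⊢; omega
  | cons a l ih =>
    intro k hk hiff
    cases k with
    | zero =>
      have ha : p a = false := by
        have := hiff 0 (by simp)
        simpa using this
      have hl : l.countP p = 0 := by
        apply ih 0 (Nat.zero_le _)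
        intro j hj
        have := hiff (j + 1) (by simpa using Nat.succ_lt_succ hj)
        simpa using this
      simp [ha, hl]
    | succ k =>
      have ha : p a = true := by
        have := hiff 0 (by simp)
        simpa using this
      have hl : l.countP p = k := by
        apply ih k (by simpa using Nat.succ_le_succ_iff.mp hk)
        intro j hj
        have := hiff (j + 1) (by simpa using Nat.succ_lt_succ hj)
        simpa [Nat.succ_lt_succ_iff] using this
      simp [ha, hl]

-- ===== VERDICT (by name: the statement is the Claim_ definition above) =====
theorem countleaps_spec : Claim_equal_countleaps := by
  intro t _
  unfold Spec_countleaps countleaps countleaps_alt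
  obtain ⟨h1, h2, h3⟩ := PySem.List.bisectRight_spec leapsTable t (by decide)
  rw [show (fun (nleaps : Int) leap => if t ≥ leap then nleaps + 1 else nleaps)
        = (fun (acc : Int) x => if (fun leap => decide (t ≥ leap)) x = true then acc + 1 else acc)
      from by funext a b; simp]
  rw [PySem.List.foldl_count_if (fun leap => decide (t ≥ leap)) leapsTable 0]
  rw [countP_of_iff_lt (fun leap => decide (t ≥ leap)) leapsTable
        (PySem.List.bisectRight leapsTable t) h1 ?_]
  · simp
  · intro j hj
    simp only [decide_eq_true_eq, ge_iff_le]
    constructor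
    · intro hle
      by_contra hnot
      exact absurd hle (not_le.mpr (h3 j hj (Nat.le_of_not_lt hnot)))
    · exact h2 j hj
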